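-- pv_equiv track=rewrite | github.com/eholdmore/telomere_analysis_pipeline | collect_paths.py | select_cnv_file
-- ===== SOURCE A (Python) =====
-- def select_cnv_file(files):
--     """Prefer somatic CNV files over germline."""
--     if not files:
--         return None
--     somatic = [f for f in files if "somatic" in f.lower()]
--     if somatic:
--         return somatic[0]
--     standard = [f for f in files if "germline" not in f.lower()]
--     if standard:
--         return standard[0]
--     return files[0]
-- ===== SOURCE B (Python) =====
-- def select_cnv_file(files):
--     """Prefer somatic CNV files over germline (single pass, first-seen candidates)."""
--     if not files:
--         return None
--     first_somatic = None
--     first_standard = None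
--     first_any = None
--     for f in files:
--         fl = f.lower()
--         if first_somatic is None and "somatic" in fl:
--             first_somatic = f
--         if first_standard is None and "germline" not in fl:
--             first_standard = f
--         if first_any is None:
--             first_any = f
--     if first_somatic is not None:
--         return first_somatic
--     if first_standard is not None:
--         return first_standard
--     return first_any
-- ===== Notes on version B (the rewrite author's own statement) =====
-- stated objective: alternative
-- what changed: Replaced A's three separate scans (two list comprehensions plus indexing) with a single pass that records the first somatic, first non-germline and first element, then returns them in priority order.
import Mathlib
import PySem

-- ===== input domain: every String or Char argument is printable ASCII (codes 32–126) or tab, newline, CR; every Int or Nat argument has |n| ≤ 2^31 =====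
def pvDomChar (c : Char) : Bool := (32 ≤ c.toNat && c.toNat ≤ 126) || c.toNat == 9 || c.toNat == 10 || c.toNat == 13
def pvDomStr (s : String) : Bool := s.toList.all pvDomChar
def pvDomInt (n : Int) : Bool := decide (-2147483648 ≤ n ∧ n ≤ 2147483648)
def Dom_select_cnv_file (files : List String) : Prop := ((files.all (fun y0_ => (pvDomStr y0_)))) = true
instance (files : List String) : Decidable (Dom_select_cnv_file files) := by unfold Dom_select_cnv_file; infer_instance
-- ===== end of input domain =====

-- B replaces A's three separate list scans with a single pass keeping first-seen candidates (alternative decomposition, same cost).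


-- ===== PORT A =====
-- Python A: guard, then `somatic` filter, then `standard` filter, then files[0] (nonempty here, so head?).
def select_cnv_file (files : List String) : Option String :=
  if files.isEmpty then none
  else
    let somatic := files.filter (fun f => PySem.Str.isIn "somatic" (PySem.Str.lower f))
    match somatic with
    | f :: _ => some f
    | [] =>
      let standard := files.filter (fun f => !(PySem.Str.isIn "germline" (PySem.Str.lower f)))
      match standard with
      | f :: _ => some f
      | [] => files.head?

-- ===== PORT B =====
-- Python B: one pass keeping first-seen candidates (first somatic, first non-germline, first element).
def pvStepB (acc : Option String × Option String × Option String) (f : String) :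
    Option String × Option String × Option String :=
  let fl := PySem.Str.lower f
  ( if acc.1.isNone && PySem.Str.isIn "somatic" fl then some f else acc.1,
    if acc.2.1.isNone && !(PySem.Str.isIn "germline" fl) then some f else acc.2.1,
    if acc.2.2.isNone then some f else acc.2.2 )

def select_cnv_file_alt (files : List String) : Option String :=
  if files.isEmpty then none
  else
    let st := files.foldl pvStepB (none, none, none)
    match st.1 with
    | some f => some f
    | none =>
      match st.2.1 with
      | some f => some f
      | none => st.2.2

-- ===== PRECONDITION & SPEC =====
def Spec_select_cnv_file (files : List String) (out : Option String) : Prop := out = select_cnv_file_alt files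
instance (files : List String) (out : Option String) : Decidable (Spec_select_cnv_file files out) := by unfold Spec_select_cnv_file; infer_instance

-- ===== CLAIM (what is proved, stated in full; the proofs are below) =====
def Claim_equal_select_cnv_file : Prop := ∀ (files : List String), Dom_select_cnv_file files → Spec_select_cnv_file files (select_cnv_file files)

-- ===== LEMMAS AND PROOFS =====

-- ===== VERDICT (by name: the statement is the Claim_ definition above) =====
lemma pvFilterHead (p : String → Bool) (xs : List String) :
    (xs.filter p).head? = xs.find? p := by
  induction xs with
  | nil => rfl
  | cons x xs ih =>
    by_cases h : p x = true <;> simp [h, ih]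

lemma pvFoldGen (p q : String → Bool) (files : List String) (s g a : Option String) :
    files.foldl
      (fun acc f =>
        ( if acc.1.isNone && p f then some f else acc.1,
          if acc.2.1.isNone && q f then some f else acc.2.1,
          if acc.2.2.isNone then some f else acc.2.2 )) (s, g, a) =
      (s.or (files.find? p), g.or (files.find? q), a.or files.head?) := by
  induction files generalizing s g a with
  | nil => simp
  | cons f fs ih =>
    rw [List.foldl_cons, ih]
    cases s <;> cases g <;> cases a <;>
      by_cases hp : p f = true <;> by_cases hq : q f = true <;>
        simp [hp, hq]

lemma pvFoldB (files : List String) (s g a : Option String) :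
    files.foldl pvStepB (s, g, a) =
      ( s.or (files.find? (fun f => PySem.Str.isIn "somatic" (PySem.Str.lower f))),
        g.or (files.find? (fun f => !(PySem.Str.isIn "germline" (PySem.Str.lower f)))),
        a.or files.head? ) := by
  have h : pvStepB = (fun (acc : Option String × Option String × Option String) (f : String) =>
      ( if acc.1.isNone && (fun f => PySem.Str.isIn "somatic" (PySem.Str.lower f)) f then some f else acc.1,
        if acc.2.1.isNone && (fun f => !(PySem.Str.isIn "germline" (PySem.Str.lower f))) f then some f else acc.2.1,
        if acc.2.2.isNone then some f else acc.2.2 )) := rfl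
  rw [h, pvFoldGen]

-- ===== VERDICT (by name: the statement is the Claim_ definition above) =====
theorem select_cnv_file_spec : Claim_equal_select_cnv_file := by
  intro files _
  unfold Spec_select_cnv_file select_cnv_file select_cnv_file_alt
  cases files with
  | nil => rfl
  | cons f fs =>
    simp only [List.isEmpty_cons, Bool.false_eq_true, if_false]
    rw [pvFoldB]
    simp only [Option.none_or]
    rw [← pvFilterHead, ← pvFilterHead]
    cases h1 : (List.filter (fun f => PySem.Str.isIn "somatic" (PySem.Str.lower f)) (f :: fs)) with
    | cons v _ => simp
    | nil =>
      cases h2 : (List.filter (fun f => !(PySem.Str.isIn "germline" (PySem.Str.lower f))) (f :: fs)) with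
      | cons v _ => simp
      | nil => simp
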